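-- pv_equiv track=rewrite | github.com/PacificBiosciences/pbcore | pbcore/io/dataset/utils.py | splitKeys
-- ===== SOURCE A (Python) =====
-- def splitKeys(keys, chunks):
--     """
--     Returns key pairs for each chunk defining the bounds of each chunk.
--     """
--     if chunks < 1:
--         return []
--     if chunks > len(keys):
--         chunks = len(keys)
--     chunksize = len(keys)//chunks
--     chunksizes = [chunksize] * chunks
--     i = 0
--     while sum(chunksizes) < len(keys):
--         chunksizes[i] += 1
--         i += 1
--         i %= chunks
--     key_chunks = []
--     start = 0
--     for cs in chunksizes:
--         key_chunks.append((keys[start], keys[start + cs - 1]))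
--         start += cs
--     return key_chunks
-- ===== SOURCE B (Python) =====
-- def splitKeys(keys, chunks):
--     """
--     Returns key pairs for each chunk defining the bounds of each chunk.
--     """
--     n = len(keys)
--     if chunks < 1 or n == 0:
--         return []
--     chunks = min(chunks, n)
--     q, r = divmod(n, chunks)
--     # chunk i covers [i*q + min(i, r), (i+1)*q + min(i+1, r) - 1]: the first
--     # r chunks have size q+1, the rest size q -- closed form, no repeated sum()
--     return [(keys[i * q + min(i, r)], keys[(i + 1) * q + min(i + 1, r) - 1])
--             for i in range(chunks)]
-- ===== Notes on version B (the rewrite author's own statement) =====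
-- stated objective: faster
-- what changed: Replaces the while-loop that repeatedly recomputes sum(chunksizes) (and the running-start emission loop) with the closed form n = q*chunks + r: chunk i starts at i*q + min(i,r), built in one comprehension.
import Mathlib
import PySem

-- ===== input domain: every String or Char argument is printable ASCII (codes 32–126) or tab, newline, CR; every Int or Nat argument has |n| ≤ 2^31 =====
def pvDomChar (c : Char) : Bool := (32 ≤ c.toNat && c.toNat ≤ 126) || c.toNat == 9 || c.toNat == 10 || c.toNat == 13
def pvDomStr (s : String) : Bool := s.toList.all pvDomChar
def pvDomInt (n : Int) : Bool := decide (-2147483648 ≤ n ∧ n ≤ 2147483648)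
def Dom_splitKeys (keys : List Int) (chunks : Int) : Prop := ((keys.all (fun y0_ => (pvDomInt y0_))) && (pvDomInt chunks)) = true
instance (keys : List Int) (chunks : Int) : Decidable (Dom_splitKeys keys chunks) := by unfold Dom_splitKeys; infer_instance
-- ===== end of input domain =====

-- B replaces A's quadratic while-loop (which recomputes sum(chunksizes) each pass)
-- and the running-start emission loop by the closed form n = q*chunks + r.

-- ===== PORT A =====
-- the 'while sum(chunksizes) < len(keys): chunksizes[i] += 1; i += 1; i %= chunks' loop;
-- fuel = len(keys) suffices (the loop runs len(keys) % chunks < len(keys) times when A returns)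
def splitKeysWhile (fuel : Nat) (chunks n : Int) (cz : List Int) (i : Int) : List Int :=
  match fuel with
  | 0 => cz
  | f + 1 =>
    if cz.sum < n then
      splitKeysWhile f chunks n (cz.modify i.toNat (fun x => x + 1)) (PySem.Int.mod (i + 1) chunks)
    else cz

def splitKeys (keys : List Int) (chunks : Int) : List (Int × Int) :=
  if chunks < 1 then []
  else
    let n : Int := keys.length
    let chunks := if chunks > n then n else chunks
    -- len(keys)//chunks: on keys = [] this is Python's ZeroDivisionError (excluded by Pre_)
    let chunksize := PySem.Int.floordiv n chunks
    let chunksizes := List.replicate chunks.toNat chunksize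
    let chunksizes := splitKeysWhile keys.length chunks n chunksizes 0
    -- keys[start] / keys[start+cs-1]: indices are in range whenever A returns, so pyGetD is exact there
    (chunksizes.foldl
      (fun (p : List (Int × Int) × Int) cs =>
        (p.1 ++ [(PySem.List.pyGetD keys p.2 0, PySem.List.pyGetD keys (p.2 + cs - 1) 0)], p.2 + cs))
      ([], 0)).1

-- ===== PORT B =====
def splitKeys_alt (keys : List Int) (chunks : Int) : List (Int × Int) :=
  let n : Int := keys.length
  if chunks < 1 ∨ n = 0 then []
  else
    let c := min chunks n
    let q := PySem.Int.floordiv n c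
    let r := PySem.Int.mod n c
    -- keys[...]: both indices are always in [0, n), so pyGetD is exact
    (PySem.List.pyRange 0 c 1).map (fun i =>
      (PySem.List.pyGetD keys (i * q + min i r) 0,
       PySem.List.pyGetD keys ((i + 1) * q + min (i + 1) r - 1) 0))

-- ===== PRECONDITION & SPEC =====
-- Pre_ excludes only keys = [] with chunks ≥ 1, where A raises ZeroDivisionError
def Pre_splitKeys (keys : List Int) (chunks : Int) : Prop := keys ≠ [] ∨ chunks < 1
instance (keys : List Int) (chunks : Int) : Decidable (Pre_splitKeys keys chunks) := by
  unfold Pre_splitKeys; infer_instance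

def pvWitness_splitKeys : List Int × Int := ([1, 2, 3, 4, 5], 2)

def Spec_splitKeys (keys : List Int) (chunks : Int) (out : List (Int × Int)) : Prop :=
  out = splitKeys_alt keys chunks
instance (keys : List Int) (chunks : Int) (out : List (Int × Int)) :
    Decidable (Spec_splitKeys keys chunks out) := by unfold Spec_splitKeys; infer_instance

-- ===== CLAIM (what is proved, stated in full; the proofs are below) =====
def Claim_equal_splitKeys : Prop := ∀ (keys : List Int) (chunks : Int),
  Dom_splitKeys keys chunks → Pre_splitKeys keys chunks →
  Spec_splitKeys keys chunks (splitKeys keys chunks)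

-- ===== LEMMAS AND PROOFS =====

-- recursive view of A's emission fold
def emitA (keys : List Int) : List Int → Int → List (Int × Int)
  | [], _ => []
  | cs :: rest, s =>
    (PySem.List.pyGetD keys s 0, PySem.List.pyGetD keys (s + cs - 1) 0) :: emitA keys rest (s + cs)

theorem foldl_emitA (keys : List Int) :
    ∀ (szs : List Int) (acc : List (Int × Int)) (s : Int),
    (szs.foldl
      (fun (p : List (Int × Int) × Int) cs =>
        (p.1 ++ [(PySem.List.pyGetD keys p.2 0, PySem.List.pyGetD keys (p.2 + cs - 1) 0)], p.2 + cs))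
      (acc, s)).1 = acc ++ emitA keys szs s := by
  intro szs
  induction szs with
  | nil => intro acc s; simp [emitA]
  | cons cs rest ih => intro acc s; simp [emitA, ih]

theorem emitA_append (keys : List Int) :
    ∀ (l1 l2 : List Int) (s : Int),
    emitA keys (l1 ++ l2) s = emitA keys l1 s ++ emitA keys l2 (s + l1.sum) := by
  intro l1
  induction l1 with
  | nil => intro l2 s; simp [emitA]
  | cons c t ih =>
    intro l2 s
    simp [emitA, ih, add_assoc]

theorem emitA_replicate (keys : List Int) :
    ∀ (m : Nat) (s v : Int),
    emitA keys (List.replicate m v) s =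
      (List.range m).map (fun (j : Nat) =>
        (PySem.List.pyGetD keys (s + (j : Int) * v) 0,
         PySem.List.pyGetD keys (s + (j : Int) * v + v - 1) 0)) := by
  intro m
  induction m with
  | zero => intro s v; simp [emitA]
  | succ k ih =>
    intro s v
    rw [List.replicate_succ' (n := k), emitA_append keys, ih, List.range_succ, List.map_append]
    have hs : (List.replicate k v).sum = (k : Int) * v := by
      simp [List.sum_replicate]
    simp [emitA, hs]

theorem modify_cons_succ (x : Int) (l : List Int) (n : Nat) (f : Int → Int) :
    (x :: l).modify (n + 1) f = x :: l.modify n f := by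
  simp [List.modify]

-- modifying the element just past a replicate-prefix
theorem modify_replicate_mid (x y : Int) :
    ∀ (a : Nat) (t : List Int),
    (List.replicate a x ++ y :: t).modify a (fun z => z + 1) =
      List.replicate a x ++ (y + 1) :: t := by
  intro a
  induction a with
  | zero => intro t; simp [List.modify]
  | succ k ih =>
    intro t
    simp only [List.replicate_succ, List.cons_append, modify_cons_succ, ih]

-- the while loop turns [q]*C into [q+1]*R ++ [q]*(C-R)
theorem while_invariant (c n q : Int) (C R : Nat) (hc : (C : Int) = c) (hR : R < C)
    (hn : n = c * q + (R : Int)) :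
    ∀ (f k : Nat), k ≤ R → R ≤ f + k →
    splitKeysWhile f c n (List.replicate k (q + 1) ++ List.replicate (C - k) q) (k : Int) =
      List.replicate R (q + 1) ++ List.replicate (C - R) q := by
  subst hn
  intro f
  induction f with
  | zero =>
    intro k hk hf
    have : k = R := by omega
    subst this
    rfl
  | succ g ih =>
    intro k hk hf
    rw [splitKeysWhile]
    have hsum : (List.replicate k (q + 1) ++ List.replicate (C - k) q).sum
        = c * q + (k : Int) := by
      simp [List.sum_replicate]
      have hck : ((C - k : Nat) : Int) = (C : Int) - (k : Int) := by
        have : k ≤ C := by omega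
        omega
      rw [hck, hc]; ring
    rw [hsum]
    by_cases hlt : k < R
    · have hcond : c * q + (k : Int) < c * q + (R : Int) := by
        have : (k : Int) < (R : Int) := by exact_mod_cast hlt
        omega
      rw [if_pos hcond]
      have hkC : k < C := by omega
      have hsplit : List.replicate (C - k) q = q :: List.replicate (C - k - 1) q := by
        rw [← List.replicate_succ]
        congr 1
        omega
      have htoNat : ((k : Int)).toNat = k := by simp
      rw [hsplit, htoNat]
      have hlen : (List.replicate k (q + 1)).length = k := by simp
      rw [modify_replicate_mid]
      have hmod : PySem.Int.mod ((k : Int) + 1) c = ((k + 1 : Nat) : Int) := by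
        have hb : (0 : Int) < c := by omega
        rw [PySem.Int.mod_eq_emod_of_pos hb]
        have h1 : (0 : Int) ≤ (k : Int) + 1 := by positivity
        have h2 : (k : Int) + 1 < c := by
          have : (k : Int) + 1 ≤ (R : Int) := by exact_mod_cast hlt
          omega
        rw [Int.emod_eq_of_lt h1 h2]
        omega
      rw [hmod]
      have hstate : List.replicate k (q + 1) ++ (q + 1) :: List.replicate (C - k - 1) q
          = List.replicate (k + 1) (q + 1) ++ List.replicate (C - (k + 1)) q := by
        rw [List.replicate_succ' (n := k)]
        simp only [List.append_assoc, List.singleton_append]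
        congr 2
      rw [hstate]
      have := ih (k + 1) (by omega) (by omega)
      exact_mod_cast this
    · have : k = R := by omega
      subst this
      rw [if_neg (by omega)]

theorem splitKeys_eq_alt (keys : List Int) (chunks : Int)
    (hpre : Pre_splitKeys keys chunks) :
    splitKeys keys chunks = splitKeys_alt keys chunks := by
  by_cases hlt : chunks < 1
  · unfold splitKeys splitKeys_alt
    rw [if_pos hlt, if_pos (Or.inl hlt)]
  · -- chunks ≥ 1, so Pre_ gives keys ≠ []
    have hne : keys ≠ [] := by
      cases hpre with
      | inl h => exact h
      | inr h => omega
    have hN : 0 < keys.length := List.length_pos_iff.mpr hne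
    set N := keys.length with hNdef
    set n : Int := (N : Int) with hndef
    have hn0 : 0 < n := by rw [hndef]; exact_mod_cast hN
    set c : Int := min chunks n with hcdef
    have hc1 : 1 ≤ c := by omega
    have hcn : c ≤ n := by omega
    set q : Int := PySem.Int.floordiv n c with hq
    set r : Int := PySem.Int.mod n c with hr
    have hcpos : (0 : Int) < c := by omega
    have hqe : q = n / c := by rw [hq, PySem.Int.floordiv_eq_ediv_of_pos hcpos]
    have hre : r = n % c := by rw [hr, PySem.Int.mod_eq_emod_of_pos hcpos]
    have hdm : c * q + r = n := by rw [hqe, hre]; exact Int.mul_ediv_add_emod n c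
    have hr0 : 0 ≤ r := by rw [hre]; exact Int.emod_nonneg n (by omega)
    have hrc : r < c := by rw [hre]; exact Int.emod_lt_of_pos n hcpos
    set C : Nat := c.toNat with hC
    set R : Nat := r.toNat with hRd
    have hcC : (C : Int) = c := Int.toNat_of_nonneg (by omega)
    have hrR : (R : Int) = r := Int.toNat_of_nonneg hr0
    have hRC : R < C := by omega
    -- A's clamped chunks equals c
    have hclamp : (if chunks > n then n else chunks) = c := by
      rw [hcdef]; split_ifs with h <;> omega
    -- while loop result
    have hwhile :
        splitKeysWhile N c n (List.replicate C q) 0 =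
          List.replicate R (q + 1) ++ List.replicate (C - R) q := by
      have h0 : List.replicate 0 (q + 1) ++ List.replicate (C - 0) q = List.replicate C q := by
        simp
      have := while_invariant c n q C R hcC hRC (by omega) N 0 (by omega) (by omega)
      rw [h0] at this
      exact_mod_cast this
    -- unfold A (simp zeta-reduces the let bindings)
    simp only [splitKeys, splitKeys_alt]
    rw [if_neg hlt, if_neg (show ¬(chunks < 1 ∨ n = 0) by rintro (h | h) <;> omega)]
    simp only [← hNdef, ← hndef, ← hcdef, ← hq, ← hr]
    rw [hclamp, ← hC, hwhile, foldl_emitA, List.nil_append]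
    -- B as a single map over List.range C
    rw [PySem.List.pyRange_one, List.map_map]
    rw [show (c - 0).toNat = C by rw [sub_zero, ← hC]]
    -- A as two maps over List.range R / List.range (C - R)
    rw [emitA_append, emitA_replicate, emitA_replicate]
    rw [show (0 : Int) + (List.replicate R (q + 1)).sum = (R : Int) * (q + 1) by
      simp [List.sum_replicate]]
    have hsplitRange :
        List.range C = List.range R ++ (List.range (C - R)).map (fun j => R + j) := by
      conv_lhs => rw [show C = R + (C - R) by omega]
      rw [List.range_add]
    rw [hsplitRange, List.map_append, List.map_map]
    congr 1
    · apply List.map_congr_left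
      intro j hj
      have hj' : j < R := List.mem_range.mp hj
      simp only [Function.comp_apply]
      rw [min_eq_left (show (0 : Int) + (j : Int) ≤ r by omega),
        min_eq_left (show (0 : Int) + (j : Int) + 1 ≤ r by omega)]
      simp only [Prod.mk.injEq]
      constructor <;> · congr 1; ring
    · apply List.map_congr_left
      intro j hj
      have hj' : j < C - R := List.mem_range.mp hj
      simp only [Function.comp_apply]
      rw [min_eq_right (show r ≤ (0 : Int) + ((R + j : Nat) : Int) by push_cast; omega),
        min_eq_right (show r ≤ (0 : Int) + ((R + j : Nat) : Int) + 1 by push_cast; omega)]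
      simp only [Prod.mk.injEq]
      constructor <;> · congr 1; rw [← hrR]; push_cast; ring

-- ===== VERDICT (by name: the statement is the Claim_ definition above) =====
theorem splitKeys_spec : Claim_equal_splitKeys := by
  intro keys chunks _ hpre
  unfold Spec_splitKeys
  exact splitKeys_eq_alt keys chunks hpre
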